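-- pv_equiv track=rewrite | github.com/StevTheDev/Advent_of_Code_2018 | Day 2/day2.py | check
-- ===== SOURCE A (Python) =====
-- def check(string):
--     ''' Parse a string and return a tuple of boolean int values:
--         two if any character appears exactly 2 times in the string
--         three if any character appears exactly 3 times in the string
--     '''
--     seen = {}
--     for char in list(string):
--         if char not in seen:
--             seen[char] = 1
--         else:
--             seen[char] = seen[char] + 1
--     two = three = 0
--     for char in seen:
--         if two and three:
--             break
--         elif seen[char] == 2:
--             two = 1
--         elif seen[char] == 3:
--             three = 1
--     return (two, three)
-- ===== SOURCE B (Python) =====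
-- def check(string):
--     ''' Parse a string and return a tuple of boolean int values:
--         two if any character appears exactly 2 times in the string
--         three if any character appears exactly 3 times in the string
--     '''
--     two = three = 0
--     prev = None
--     run = 0
--     for ch in sorted(string):
--         if ch == prev:
--             run += 1
--         else:
--             if run == 2:
--                 two = 1
--             elif run == 3:
--                 three = 1
--             prev = ch
--             run = 1
--     if run == 2:
--         two = 1
--     elif run == 3:
--         three = 1
--     return (two, three)
-- ===== Notes on version B (the rewrite author's own statement) =====
-- stated objective: alternative
-- what changed: Replaces dict-based frequency counting plus a values scan with a single run-length pass over the sorted character list (sort-and-group instead of hashing).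
import Mathlib
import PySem

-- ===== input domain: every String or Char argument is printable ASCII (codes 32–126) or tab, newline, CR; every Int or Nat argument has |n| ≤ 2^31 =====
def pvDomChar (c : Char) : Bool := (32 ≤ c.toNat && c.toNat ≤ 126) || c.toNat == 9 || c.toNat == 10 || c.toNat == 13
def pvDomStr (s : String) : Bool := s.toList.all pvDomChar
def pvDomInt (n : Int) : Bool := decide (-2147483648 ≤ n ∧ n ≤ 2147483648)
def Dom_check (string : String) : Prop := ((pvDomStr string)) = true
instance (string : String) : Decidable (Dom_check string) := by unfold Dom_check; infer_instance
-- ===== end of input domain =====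

-- B replaces dict frequency counting with a run-length pass over the sorted characters (alternative algorithm, same results).

-- ===== PORT A =====
-- the 'for char in seen' loop with its 'if two and three: break'
def checkLoop (d : PySem.Dict Char Int) : List Char → Int × Int → Int × Int
  | [], tt => tt
  | c :: cs, (two, three) =>
      if two ≠ 0 ∧ three ≠ 0 then (two, three)
      else if d.getD c 0 = 2 then checkLoop d cs (1, three)
      else if d.getD c 0 = 3 then checkLoop d cs (two, 1)
      else checkLoop d cs (two, three)

def check (string : String) : Int × Int :=
  let seen := string.toList.foldl
    (fun d ch => if d.contains ch = false then d.insert ch 1 else d.insert ch (d.getD ch 0 + 1))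
    PySem.Dict.empty
  checkLoop seen seen.keys (0, 0)

-- ===== PORT B =====
-- the trailing 'if run == 2 … elif run == 3 …' of Source B, also performed when the character changes
def flushRun (two three run : Int) : Int × Int :=
  if run = 2 then (1, three) else if run = 3 then (two, 1) else (two, three)

-- the 'for ch in sorted(string)' loop of Source B with its final flush
def runPass : List Char → Int → Int → Option Char → Int → Int × Int
  | [], two, three, _, run => flushRun two three run
  | ch :: rest, two, three, prev, run =>
      if some ch = prev then runPass rest two three prev (run + 1)
      else
        let p := flushRun two three run
        runPass rest p.1 p.2 (some ch) 1

def check_alt (string : String) : Int × Int :=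
  runPass (PySem.List.sorted string.toList (fun c => c) false) 0 0 none 0

-- ===== PRECONDITION & SPEC =====
def Spec_check (string : String) (out : Int × Int) : Prop := out = check_alt string
instance (string : String) (out : Int × Int) : Decidable (Spec_check string out) := by unfold Spec_check; infer_instance

-- ===== CLAIM (what is proved, stated in full; the proofs are below) =====
def Claim_equal_check : Prop := ∀ (string : String), Dom_check string → Spec_check string (check string)

-- ===== LEMMAS AND PROOFS =====

-- both sides reduce to this: 1 iff some character has count 2 (resp. 3)
def tgt (l : List Char) : Int × Int :=
  (if l.any (fun c => l.count c = 2) then 1 else 0,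
   if l.any (fun c => l.count c = 3) then 1 else 0)

theorem if10_eq_one (a : Prop) [Decidable a] : ((if a then (1 : Int) else 0) = 1) ↔ a := by
  split_ifs with h <;> simp [h]

theorem checkLoop_eq (d : PySem.Dict Char Int) :
    ∀ (ks : List Char) (two three : Int), (two = 0 ∨ two = 1) → (three = 0 ∨ three = 1) →
    checkLoop d ks (two, three) =
      ((if two = 1 ∨ ks.any (fun c => d.getD c 0 = 2) then 1 else 0),
       (if three = 1 ∨ ks.any (fun c => d.getD c 0 = 3) then 1 else 0)) := by
  intro ks
  induction ks with
  | nil =>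
      intro two three h2 h3
      simp only [checkLoop, List.any_nil]
      rcases h2 with h2 | h2 <;> rcases h3 with h3 | h3 <;> subst h2 <;> subst h3 <;> norm_num
  | cons c cs ih =>
      intro two three h2 h3
      simp only [checkLoop, List.any_cons]
      by_cases hb : two ≠ 0 ∧ three ≠ 0
      · rcases h2 with h2 | h2 <;> rcases h3 with h3 | h3 <;> subst h2 <;> subst h3 <;>
          simp_all
      · rw [if_neg hb]
        by_cases hc2 : d.getD c 0 = 2
        · rw [if_pos hc2, ih 1 three (Or.inr rfl) h3]
          simp [hc2]
        · rw [if_neg hc2]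
          by_cases hc3 : d.getD c 0 = 3
          · rw [if_pos hc3, ih two 1 h2 (Or.inr rfl)]
            simp [hc2, hc3]
          · rw [if_neg hc3, ih two three h2 h3]
            simp [hc2, hc3]

theorem counter_any (l : List Char) (mi : Int) (mn : Nat) (hm : mi = (mn : Int)) :
    ((PySem.Dict.counter l).keys.any (fun c => (PySem.Dict.counter l).getD c 0 = mi))
      = l.any (fun c => l.count c = mn) := by
  rw [Bool.eq_iff_iff]
  constructor
  · intro h
    rcases List.any_eq_true.mp h with ⟨c, hc, hcnt⟩
    have hcnt' := of_decide_eq_true hcnt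
    rw [PySem.Dict.getD_counter, hm] at hcnt'
    refine List.any_eq_true.mpr ⟨c, ?_, decide_eq_true (by exact_mod_cast hcnt')⟩
    rw [PySem.Dict.keys_counter] at hc
    exact (PySem.Set.mem_ofList _ _).mp hc
  · intro h
    rcases List.any_eq_true.mp h with ⟨c, hc, hcnt⟩
    have hcnt' := of_decide_eq_true hcnt
    refine List.any_eq_true.mpr ⟨c, ?_, decide_eq_true ?_⟩
    · rw [PySem.Dict.keys_counter]
      exact (PySem.Set.mem_ofList _ _).mpr hc
    · rw [PySem.Dict.getD_counter, hm]
      exact_mod_cast hcnt'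

theorem check_eq_tgt (string : String) : check string = tgt string.toList := by
  have hstep : (fun (d : PySem.Dict Char Int) ch =>
      if d.contains ch = false then d.insert ch 1 else d.insert ch (d.getD ch 0 + 1))
      = (fun d x => d.insert x (d.getD x 0 + 1)) := by
    funext d ch
    by_cases h : d.contains ch
    · simp [h]
    · have hg : d.getD ch 0 = 0 := by
        have hn : d.get? ch = none := by
          rw [PySem.Dict.get?_eq_none_iff_contains]
          simpa using h
        simp [PySem.Dict.getD, hn]
      simp [h, hg]
  show checkLoop _ _ (0, 0) = _
  rw [hstep, PySem.Dict.foldl_insert_getD_add_one_eq_counter]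
  rw [checkLoop_eq _ _ 0 0 (Or.inl rfl) (Or.inl rfl)]
  unfold tgt
  rw [counter_any _ 2 2 (by norm_num), counter_any _ 3 3 (by norm_num)]
  norm_num

theorem flushRun_eq (two three r : Int) (h2 : two = 0 ∨ two = 1) (h3 : three = 0 ∨ three = 1) :
    flushRun two three r = (if two = 1 ∨ r = 2 then 1 else 0, if three = 1 ∨ r = 3 then 1 else 0) := by
  unfold flushRun
  rcases h2 with rfl | rfl <;> rcases h3 with rfl | rfl <;>
    split_ifs <;> simp_all

-- consuming a run of equal characters just increments the run counter
theorem runPass_replicate (ch : Char) :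
    ∀ (j : Nat) (l' : List Char) (two three r : Int),
    runPass (List.replicate j ch ++ l') two three (some ch) r
      = runPass l' two three (some ch) (r + j) := by
  intro j
  induction j with
  | zero => intro l' two three r; simp
  | succ j ih =>
      intro l' two three r
      simp only [List.replicate_succ, List.cons_append, runPass]
      rw [if_pos trivial, ih]
      congr 1
      push_cast
      ring

-- the head block of a sorted list: all copies of the head are consecutive
theorem sorted_head_block :
    ∀ (l : List Char) (ch : Char), (ch :: l).Pairwise (· ≤ ·) →
    ∃ l₂, ch :: l = List.replicate ((ch :: l).count ch) ch ++ l₂ ∧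
      l₂.Pairwise (· ≤ ·) ∧ (∀ c ∈ l₂, ch < c) := by
  intro l
  induction l with
  | nil =>
      intro ch _
      exact ⟨[], by simp, List.Pairwise.nil, by simp⟩
  | cons b t ih =>
      intro ch hp
      have hcb : ch ≤ b := (List.pairwise_cons.mp hp).1 b (by simp)
      have htl : (b :: t).Pairwise (· ≤ ·) := (List.pairwise_cons.mp hp).2
      by_cases hbc : b = ch
      · subst hbc
        rcases ih b htl with ⟨l₂, heq, hpl₂, hlt⟩
        refine ⟨l₂, ?_, hpl₂, hlt⟩
        have hcnt : (b :: b :: t).count b = (b :: t).count b + 1 := by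
          simp
        rw [hcnt, List.replicate_succ, List.cons_append, ← heq]
      · have hltb : ch < b := lt_of_le_of_ne hcb (fun h => hbc h.symm)
        refine ⟨b :: t, ?_, htl, ?_⟩
        · have hnb : ch ∉ b :: t := by
            intro hmem
            rcases List.mem_cons.mp hmem with h | h
            · exact hbc h.symm
            · have := (List.pairwise_cons.mp htl).1 ch h
              exact absurd this (not_le.mpr hltb)
          have hcnt : (ch :: b :: t).count ch = 1 := by
            simp [List.count_eq_zero.mpr hnb]
          rw [hcnt]; simp
        · intro c hc
          rcases List.mem_cons.mp hc with h | h
          · exact h ▸ hltb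
          · exact lt_of_lt_of_le hltb ((List.pairwise_cons.mp htl).1 c h)

theorem runPass_eq :
    ∀ (n : Nat) (l : List Char), l.length ≤ n → l.Pairwise (· ≤ ·) →
    ∀ (two three : Int) (prev : Option Char) (r : Int),
    (two = 0 ∨ two = 1) → (three = 0 ∨ three = 1) →
    (∀ c x, prev = some c → x ∈ l → c < x) →
    runPass l two three prev r =
      (if two = 1 ∨ r = 2 ∨ l.any (fun c => l.count c = 2) then 1 else 0,
       if three = 1 ∨ r = 3 ∨ l.any (fun c => l.count c = 3) then 1 else 0) := by
  intro n
  induction n with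
  | zero =>
      intro l hl _ two three prev r h2 h3 _
      have hnil : l = [] := List.length_eq_zero_iff.mp (Nat.le_zero.mp hl)
      subst hnil
      show flushRun two three r = _
      rw [flushRun_eq two three r h2 h3]
      simp
  | succ n ih =>
      intro l hl hp two three prev r h2 h3 hprev
      rcases l with _ | ⟨ch, rest⟩
      · show flushRun two three r = _
        rw [flushRun_eq two three r h2 h3]
        simp
      · have hne : ¬ (some ch = prev) := by
          rcases prev with _ | p
          · simp
          · intro h
            have := hprev p ch rfl (by simp)
            rw [Option.some_inj] at h
            exact absurd (h ▸ this) (lt_irrefl _)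
        rcases sorted_head_block rest ch hp with ⟨l₂, heq, hpl₂, hgt⟩
        set k := (ch :: rest).count ch with hk
        have hk1 : 1 ≤ k := List.count_pos_iff.mpr (by simp)
        obtain ⟨t2, t3, hfl⟩ : ∃ t2 t3, flushRun two three r = (t2, t3) := ⟨_, _, rfl⟩
        have hflv : (t2, t3) = ((if two = 1 ∨ r = 2 then (1:Int) else 0),
            (if three = 1 ∨ r = 3 then (1:Int) else 0)) := by
          rw [← hfl, flushRun_eq two three r h2 h3]
        have ht2v : t2 = if two = 1 ∨ r = 2 then 1 else 0 := congrArg Prod.fst hflv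
        have ht3v : t3 = if three = 1 ∨ r = 3 then 1 else 0 := congrArg Prod.snd hflv
        have hstep : runPass (ch :: rest) two three prev r
            = runPass l₂ t2 t3 (some ch) (k : Int) := by
          conv_lhs => rw [heq]
          obtain ⟨k', hk'⟩ := Nat.exists_eq_add_of_le hk1
          rw [hk', Nat.add_comm 1 k', List.replicate_succ, List.cons_append]
          show (if some ch = prev then _ else _) = _
          rw [if_neg hne]
          simp only [hfl]
          rw [runPass_replicate ch k' l₂ t2 t3 1]
          congr 1
          push_cast
          ring
        rw [hstep]
        have hlen : l₂.length ≤ n := by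
          have h1 : (ch :: rest).length = k + l₂.length := by
            rw [heq]; simp
          have h2' : (ch :: rest).length ≤ n + 1 := hl
          omega
        rw [ih l₂ hlen hpl₂ t2 t3 (some ch) (k : Int)
          (by rw [ht2v]; split_ifs <;> simp)
          (by rw [ht3v]; split_ifs <;> simp)
          (by intro c x hc hx; rw [Option.some_inj] at hc; exact hc ▸ hgt x hx)]
        have hcount : ∀ c ∈ l₂, (ch :: rest).count c = l₂.count c := by
          intro c hc
          rw [heq, List.count_append, List.count_replicate]
          have hne' : c ≠ ch := fun h => absurd (hgt c hc) (by rw [h]; exact lt_irrefl _)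
          have hne'' : ¬ (ch = c) := fun h => hne' h.symm
          simp [hne'']
        have hany : ∀ (m : Nat), ((ch :: rest).any (fun c => (ch :: rest).count c = m))
            = (decide (k = m) || l₂.any (fun c => l₂.count c = m)) := by
          intro m
          rw [Bool.eq_iff_iff]
          simp only [Bool.or_eq_true, decide_eq_true_eq]
          constructor
          · intro h
            rcases List.any_eq_true.mp h with ⟨c, hc, hcnt⟩
            by_cases hcch : c = ch
            · subst hcch
              exact Or.inl (hk ▸ of_decide_eq_true hcnt)
            · have hcl₂ : c ∈ l₂ := by
                have hmem := hc
                rw [heq, List.mem_append] at hmem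
                rcases hmem with h' | h'
                · exact absurd (List.eq_of_mem_replicate h') hcch
                · exact h'
              refine Or.inr (List.any_eq_true.mpr ⟨c, hcl₂, ?_⟩)
              rw [← hcount c hcl₂]
              exact hcnt
          · rintro (h | h)
            · refine List.any_eq_true.mpr ⟨ch, by simp, ?_⟩
              exact decide_eq_true (by rw [← hk]; exact h)
            · rcases List.any_eq_true.mp h with ⟨c, hc, hcnt⟩
              refine List.any_eq_true.mpr ⟨c, by rw [heq, List.mem_append]; exact Or.inr hc, ?_⟩
              rw [hcount c hc]
              exact hcnt
        rw [hany 2, hany 3, ht2v, ht3v]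
        have hkc : ∀ (m : Nat), ((k : Int) = (m : Int)) ↔ k = m := fun m => by exact_mod_cast Iff.rfl
        refine congrArg₂ Prod.mk ?_ ?_
        · refine if_congr ?_ rfl rfl
          rw [if10_eq_one]
          have h2' := hkc 2
          norm_num at h2'
          simp only [Bool.or_eq_true, decide_eq_true_eq, h2']
          tauto
        · refine if_congr ?_ rfl rfl
          rw [if10_eq_one]
          have h3' := hkc 3
          norm_num at h3'
          simp only [Bool.or_eq_true, decide_eq_true_eq, h3']
          tauto

theorem check_alt_eq_tgt (string : String) : check_alt string = tgt string.toList := by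
  unfold check_alt
  have hperm : (PySem.List.sorted string.toList (fun c => c) false).Perm string.toList :=
    PySem.List.sorted_perm _ _ _
  have hp : (PySem.List.sorted string.toList (fun c => c) false).Pairwise (· ≤ ·) := by
    simpa using PySem.List.sorted_pairwise string.toList (fun c => c)
  rw [runPass_eq (PySem.List.sorted string.toList (fun c => c) false).length _ le_rfl hp
    0 0 none 0 (Or.inl rfl) (Or.inl rfl) (by intro c x h; exact absurd h (by simp))]
  unfold tgt
  have hany : ∀ (m : Nat),
      ((PySem.List.sorted string.toList (fun c => c) false).any
        (fun c => (PySem.List.sorted string.toList (fun c => c) false).count c = m))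
      = string.toList.any (fun c => string.toList.count c = m) := by
    intro m
    rw [Bool.eq_iff_iff]
    constructor
    · intro h
      rcases List.any_eq_true.mp h with ⟨c, hc, hcnt⟩
      refine List.any_eq_true.mpr ⟨c, hperm.mem_iff.mp hc, ?_⟩
      rw [← hperm.count_eq]
      exact hcnt
    · intro h
      rcases List.any_eq_true.mp h with ⟨c, hc, hcnt⟩
      refine List.any_eq_true.mpr ⟨c, hperm.mem_iff.mpr hc, ?_⟩
      rw [hperm.count_eq]
      exact hcnt
  rw [hany 2, hany 3]
  norm_num

-- ===== VERDICT (by name: the statement is the Claim_ definition above) =====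
theorem check_spec : Claim_equal_check := by
  intro string _
  unfold Spec_check
  rw [check_eq_tgt, check_alt_eq_tgt]
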